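-- pv_equiv track=rewrite | github.com/steplee/frast | frastVk/pysrc/exportObbs.py | rt_get_level_and_path_and_flags
-- ===== SOURCE A (Python) =====
-- def rt_get_level_and_path_and_flags(path_and_flags):
--     level = 1 + (path_and_flags & 3)
--     path_and_flags >>= 2
--     path = ''
--     for i in range(level):
--         path += chr(ord('0') + (path_and_flags & 7))
--         path_and_flags >>= 3
--     # while len(path) % 4 != 0: path = path + '0'
--     flags = path_and_flags
--     return level, path, flags
-- ===== SOURCE B (Python) =====
-- def rt_get_level_and_path_and_flags(path_and_flags):
--     level = 1 + (path_and_flags & 3)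
--     q = path_and_flags >> 2
--     v = q & ((1 << (3 * level)) - 1)
--     path = format(v, '0{}o'.format(level))[::-1]
--     flags = q >> (3 * level)
--     return level, path, flags
-- ===== Notes on version B (the rewrite author's own statement) =====
-- stated objective: simpler
-- what changed: A's per-digit loop (extract a digit, append its char, shift) is replaced by masking off the path bits and rendering that value with a single zero-padded octal format, reversed; the flags come from one combined shift.
import Mathlib
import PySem

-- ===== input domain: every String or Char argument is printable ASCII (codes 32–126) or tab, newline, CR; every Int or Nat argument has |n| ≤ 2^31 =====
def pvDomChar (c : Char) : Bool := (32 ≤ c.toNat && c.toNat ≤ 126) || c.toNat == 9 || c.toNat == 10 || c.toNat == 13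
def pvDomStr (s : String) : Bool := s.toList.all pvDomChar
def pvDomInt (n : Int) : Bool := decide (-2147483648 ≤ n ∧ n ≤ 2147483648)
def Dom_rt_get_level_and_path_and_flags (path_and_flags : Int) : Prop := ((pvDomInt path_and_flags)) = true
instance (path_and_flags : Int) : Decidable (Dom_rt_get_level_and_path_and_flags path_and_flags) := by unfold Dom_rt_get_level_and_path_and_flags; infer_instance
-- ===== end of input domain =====

-- B replaces A's per-digit loop by masking off the path bits and formatting that value as a
-- zero-padded octal string, reversed (objective: simpler — a closed-form base-8 conversion).

-- ===== PORT A =====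
def rt_get_level_and_path_and_flags (path_and_flags : Int) : Int × String × Int :=
  let level := 1 + PySem.Int.band path_and_flags 3
  let st := (PySem.List.pyRange 0 level 1).foldl
    (fun (st : String × Int) _ =>
      (st.1.push (Char.ofNat ('0'.toNat + (PySem.Int.band st.2 7).toNat)), st.2 >>> (3 : Nat)))
    ("", path_and_flags >>> (2 : Nat))
  (level, st.1, st.2)

-- ===== PORT B =====
-- hand port of Python's format(v, '0<w>o'): the w octal digits of v (exact since v < 8^w),
-- most significant digit first
def pvOctPad : Nat → Nat → List Char
  | 0, _ => []
  | w + 1, v => pvOctPad w (v / 8) ++ [Char.ofNat ('0'.toNat + v % 8)]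

def rt_get_level_and_path_and_flags_alt (path_and_flags : Int) : Int × String × Int :=
  let level := 1 + PySem.Int.band path_and_flags 3
  let q := path_and_flags >>> (2 : Nat)
  let v := PySem.Int.band q ((1 <<< (3 * level).toNat) - 1)
  let path := String.ofList ((pvOctPad level.toNat v.toNat).reverse)   -- [::-1] = List.reverse
  (level, path, q >>> (3 * level).toNat)

-- ===== PRECONDITION & SPEC =====
def Spec_rt_get_level_and_path_and_flags (path_and_flags : Int) (out : Int × String × Int) : Prop := out = rt_get_level_and_path_and_flags_alt path_and_flags
instance (path_and_flags : Int) (out : Int × String × Int) : Decidable (Spec_rt_get_level_and_path_and_flags path_and_flags out) := by unfold Spec_rt_get_level_and_path_and_flags; infer_instance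

-- ===== CLAIM (what is proved, stated in full; the proofs are below) =====
def Claim_equal_rt_get_level_and_path_and_flags : Prop := ∀ (path_and_flags : Int), Dom_rt_get_level_and_path_and_flags path_and_flags → Spec_rt_get_level_and_path_and_flags path_and_flags (rt_get_level_and_path_and_flags path_and_flags)

-- ===== LEMMAS AND PROOFS =====

-- Python's  a & (2^k - 1)  is  a mod 2^k (also for negative a), for the masks the ports use.
theorem pv_band_3 (q : Int) : PySem.Int.band q 3 = q % 4 := by
  have hm : ∀ m : Nat, m &&& 3 = m % 4 := fun m => by
    have := Nat.and_two_pow_sub_one_eq_mod m 2; norm_num at this; exact this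
  unfold PySem.Int.band
  by_cases ha : 0 ≤ q
  · rw [if_pos ha, if_pos (by norm_num), show ((3:Int)).toNat = 3 from rfl, hm]; omega
  · rw [if_neg ha, if_pos (by norm_num), show ((3:Int)).toNat = 3 from rfl, Nat.and_comm 3, hm]; omega

theorem pv_band_7 (q : Int) : PySem.Int.band q 7 = q % 8 := by
  have hm : ∀ m : Nat, m &&& 7 = m % 8 := fun m => by
    have := Nat.and_two_pow_sub_one_eq_mod m 3; norm_num at this; exact this
  unfold PySem.Int.band
  by_cases ha : 0 ≤ q
  · rw [if_pos ha, if_pos (by norm_num), show ((7:Int)).toNat = 7 from rfl, hm]; omega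
  · rw [if_neg ha, if_pos (by norm_num), show ((7:Int)).toNat = 7 from rfl, Nat.and_comm 7, hm]; omega

theorem pv_band_63 (q : Int) : PySem.Int.band q 63 = q % 64 := by
  have hm : ∀ m : Nat, m &&& 63 = m % 64 := fun m => by
    have := Nat.and_two_pow_sub_one_eq_mod m 6; norm_num at this; exact this
  unfold PySem.Int.band
  by_cases ha : 0 ≤ q
  · rw [if_pos ha, if_pos (by norm_num), show ((63:Int)).toNat = 63 from rfl, hm]; omega
  · rw [if_neg ha, if_pos (by norm_num), show ((63:Int)).toNat = 63 from rfl, Nat.and_comm 63, hm]; omega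

theorem pv_band_511 (q : Int) : PySem.Int.band q 511 = q % 512 := by
  have hm : ∀ m : Nat, m &&& 511 = m % 512 := fun m => by
    have := Nat.and_two_pow_sub_one_eq_mod m 9; norm_num at this; exact this
  unfold PySem.Int.band
  by_cases ha : 0 ≤ q
  · rw [if_pos ha, if_pos (by norm_num), show ((511:Int)).toNat = 511 from rfl, hm]; omega
  · rw [if_neg ha, if_pos (by norm_num), show ((511:Int)).toNat = 511 from rfl, Nat.and_comm 511, hm]; omega

theorem pv_band_4095 (q : Int) : PySem.Int.band q 4095 = q % 4096 := by
  have hm : ∀ m : Nat, m &&& 4095 = m % 4096 := fun m => by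
    have := Nat.and_two_pow_sub_one_eq_mod m 12; norm_num at this; exact this
  unfold PySem.Int.band
  by_cases ha : 0 ≤ q
  · rw [if_pos ha, if_pos (by norm_num), show ((4095:Int)).toNat = 4095 from rfl, hm]; omega
  · rw [if_neg ha, if_pos (by norm_num), show ((4095:Int)).toNat = 4095 from rfl, Nat.and_comm 4095, hm]; omega

-- unfoldings of pvOctPad at the four literal widths
theorem pvOct1 (v : Nat) : pvOctPad 1 v = [Char.ofNat (48 + v % 8)] := rfl
theorem pvOct2 (v : Nat) : pvOctPad 2 v =
    [Char.ofNat (48 + v / 8 % 8), Char.ofNat (48 + v % 8)] := rfl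
theorem pvOct3 (v : Nat) : pvOctPad 3 v =
    [Char.ofNat (48 + v / 8 / 8 % 8), Char.ofNat (48 + v / 8 % 8), Char.ofNat (48 + v % 8)] := rfl
theorem pvOct4 (v : Nat) : pvOctPad 4 v =
    [Char.ofNat (48 + v / 8 / 8 / 8 % 8), Char.ofNat (48 + v / 8 / 8 % 8),
     Char.ofNat (48 + v / 8 % 8), Char.ofNat (48 + v % 8)] := rfl

-- ===== VERDICT (by name: the statement is the Claim_ definition above) =====
theorem rt_get_level_and_path_and_flags_spec : Claim_equal_rt_get_level_and_path_and_flags := by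
  intro p _
  unfold Spec_rt_get_level_and_path_and_flags
  unfold rt_get_level_and_path_and_flags rt_get_level_and_path_and_flags_alt
  rw [pv_band_3, show '0'.toNat = 48 from rfl]
  have hr : p % 4 = 0 ∨ p % 4 = 1 ∨ p % 4 = 2 ∨ p % 4 = 3 := by omega
  rcases hr with h | h | h | h
  · simp only [h]
    rw [show (1:Int) + 0 = 1 from rfl, show PySem.List.pyRange 0 1 1 = [0] from by decide,
        show ((3:Int) * 1).toNat = 3 from rfl, show ((1:Nat) <<< 3) = 8 from rfl,
        show ((1:Int)).toNat = 1 from rfl]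
    simp only [List.foldl_cons, List.foldl_nil, Int.shiftRight_eq_div_pow, pvOct1]
    norm_num [pv_band_7]
    apply String.ext
    simp only [String.toList_push, String.toList_ofList, String.toList_empty,
      List.nil_append, List.cons.injEq, and_true]
    refine congrArg Char.ofNat ?_; omega
  · simp only [h]
    rw [show (1:Int) + 1 = 2 from rfl, show PySem.List.pyRange 0 2 1 = [0, 1] from by decide,
        show ((3:Int) * 2).toNat = 6 from rfl, show ((1:Nat) <<< 6) = 64 from rfl,
        show ((2:Int)).toNat = 2 from rfl]
    simp only [List.foldl_cons, List.foldl_nil, Int.shiftRight_eq_div_pow, pvOct2]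
    norm_num [pv_band_7, pv_band_63]
    constructor
    · apply String.ext
      simp only [String.toList_push, String.toList_ofList, String.toList_empty,
        List.nil_append, List.cons_append, List.cons.injEq, and_true]
      constructor <;> · refine congrArg Char.ofNat ?_; omega
    · omega
  · simp only [h]
    rw [show (1:Int) + 2 = 3 from rfl, show PySem.List.pyRange 0 3 1 = [0, 1, 2] from by decide,
        show ((3:Int) * 3).toNat = 9 from rfl, show ((1:Nat) <<< 9) = 512 from rfl,
        show ((3:Int)).toNat = 3 from rfl]
    simp only [List.foldl_cons, List.foldl_nil, Int.shiftRight_eq_div_pow, pvOct3]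
    norm_num [pv_band_7, pv_band_511]
    constructor
    · apply String.ext
      simp only [String.toList_push, String.toList_ofList, String.toList_empty,
        List.nil_append, List.cons_append, List.cons.injEq, and_true]
      refine ⟨?_, ?_, ?_⟩ <;> · refine congrArg Char.ofNat ?_; omega
    · omega
  · simp only [h]
    rw [show (1:Int) + 3 = 4 from rfl, show PySem.List.pyRange 0 4 1 = [0, 1, 2, 3] from by decide,
        show ((3:Int) * 4).toNat = 12 from rfl, show ((1:Nat) <<< 12) = 4096 from rfl,
        show ((4:Int)).toNat = 4 from rfl]
    simp only [List.foldl_cons, List.foldl_nil, Int.shiftRight_eq_div_pow, pvOct4]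
    norm_num [pv_band_7, pv_band_4095]
    constructor
    · apply String.ext
      simp only [String.toList_push, String.toList_ofList, String.toList_empty,
        List.nil_append, List.cons_append, List.cons.injEq, and_true]
      refine ⟨?_, ?_, ?_, ?_⟩ <;> · refine congrArg Char.ofNat ?_; omega
    · omega
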